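-- pv_equiv track=rewrite | github.com/nownabe/competitive_programming | AtCoder/ABC005C.py | search
-- ===== SOURCE A (Python) =====
-- def search(t, a, b):
--     if len(a) < len(b):
--         return False
--
--     i = 0
--     for bj in b:
--         ok = False
--         for k in range(i, len(a)):
--             if a[k] <= bj and a[k] + t >= bj:
--                 i = k + 1
--                 ok = True
--                 break
--
--         if not ok:
--             return False
--
--     return True
-- ===== SOURCE B (Python) =====
-- def search(t, a, b):
--     j = 0
--     for ak in a:
--         if j < len(b) and ak <= b[j] <= ak + t:
--             j += 1
--     return j == len(b)
-- ===== Notes on version B (the rewrite author's own statement) =====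
-- stated objective: simpler
-- what changed: Replaces the outer loop over b with an inner index-range scan over a and an ok flag by a single loop over a that advances one pointer j into b, returning j == len(b).
import Mathlib
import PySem

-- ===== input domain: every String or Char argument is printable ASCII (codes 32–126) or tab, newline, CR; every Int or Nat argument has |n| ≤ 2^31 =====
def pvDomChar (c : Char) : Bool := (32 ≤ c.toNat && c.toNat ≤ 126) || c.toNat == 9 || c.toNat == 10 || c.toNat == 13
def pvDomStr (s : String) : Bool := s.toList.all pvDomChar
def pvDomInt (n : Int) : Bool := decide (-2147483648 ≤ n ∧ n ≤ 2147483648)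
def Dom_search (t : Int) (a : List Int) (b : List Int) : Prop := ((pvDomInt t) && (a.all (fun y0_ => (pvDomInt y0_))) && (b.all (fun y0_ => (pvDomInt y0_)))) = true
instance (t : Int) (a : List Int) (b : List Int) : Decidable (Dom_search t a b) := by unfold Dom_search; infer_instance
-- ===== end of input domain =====

-- B replaces A's nested outer-b/inner-range-scan loop with a single pass over a
-- driving one pointer into b (simpler decomposition, same cost).


-- ===== PORT A =====
-- inner 'for k in range(i, len(a)): … break' loop: returns some (k+1) (the new i) on the
-- first matching k, none if the scan falls through (ok stays False)
def searchInner (t bj : Int) (a : List Int) (i : Nat) : Option Nat :=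
  if h : i < a.length then
    if a[i] ≤ bj ∧ a[i] + t ≥ bj then some (i + 1)
    else searchInner t bj a (i + 1)
  else none
termination_by a.length - i

-- outer 'for bj in b' loop carrying i
def searchOuter (t : Int) (a : List Int) : List Int → Nat → Bool
  | [], _ => true
  | bj :: rest, i =>
    match searchInner t bj a i with
    | some i' => searchOuter t a rest i'
    | none => false

def search (t : Int) (a : List Int) (b : List Int) : Bool :=
  if a.length < b.length then false
  else searchOuter t a b 0

-- ===== PORT B =====
-- loop body: advance the pointer j into b when the current a element matches b[j]
def searchStep (t : Int) (b : List Int) (j : Nat) (ak : Int) : Nat :=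
  if j < b.length ∧ ak ≤ b.getD j 0 ∧ b.getD j 0 ≤ ak + t then j + 1 else j

def search_alt (t : Int) (a : List Int) (b : List Int) : Bool :=
  decide (a.foldl (searchStep t b) 0 = b.length)

-- ===== PRECONDITION & SPEC =====
def Spec_search (t : Int) (a : List Int) (b : List Int) (out : Bool) : Prop := out = search_alt t a b
instance (t : Int) (a : List Int) (b : List Int) (out : Bool) : Decidable (Spec_search t a b out) := by unfold Spec_search; infer_instance

-- ===== CLAIM (what is proved, stated in full; the proofs are below) =====
def Claim_equal_search : Prop := ∀ (t : Int) (a : List Int) (b : List Int), Dom_search t a b → Spec_search t a b (search t a b)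

-- ===== LEMMAS AND PROOFS =====

-- reference greedy on two lists: both ports compute this
def pvG (t : Int) : List Int → List Int → Bool
  | _, [] => true
  | [], _ :: _ => false
  | ak :: a', bj :: b' =>
    if ak ≤ bj ∧ bj ≤ ak + t then pvG t a' b' else pvG t a' (bj :: b')

theorem pvG_nil_right (t : Int) (a : List Int) : pvG t a [] = true := by
  cases a <;> rfl

theorem pvG_length {t : Int} : ∀ {a b : List Int}, pvG t a b = true → b.length ≤ a.length := by
  intro a
  induction a with
  | nil => intro b h; cases b with
    | nil => simp
    | cons x xs => simp [pvG] at h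
  | cons ak a' ih =>
    intro b h
    cases b with
    | nil => simp
    | cons bj b' =>
      simp only [pvG] at h
      split_ifs at h with hc
      · have := ih h; simp; omega
      · have := ih h; simp at this ⊢; omega

theorem foldl_step_full (t : Int) (b : List Int) :
    ∀ a : List Int, a.foldl (searchStep t b) b.length = b.length := by
  intro a
  induction a with
  | nil => rfl
  | cons ak a' ih =>
    simp only [List.foldl, searchStep]
    rw [if_neg (by omega)]
    exact ih

theorem foldl_step_eq (t : Int) (b : List Int) :
    ∀ (a : List Int) (j : Nat), j ≤ b.length →
      decide (a.foldl (searchStep t b) j = b.length) = pvG t a (b.drop j) := by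
  intro a
  induction a with
  | nil =>
    intro j hj
    rcases Nat.lt_or_ge j b.length with h | h
    · have hd : b.drop j = b[j] :: b.drop (j + 1) := List.drop_eq_getElem_cons h
      rw [hd]; simp [pvG]; omega
    · have hj' : j = b.length := le_antisymm hj h
      subst hj'
      simp [List.drop_length, pvG]
  | cons ak a' ih =>
    intro j hj
    rcases Nat.lt_or_ge j b.length with h | h
    · have hd : b.drop j = b[j] :: b.drop (j + 1) := List.drop_eq_getElem_cons h
      have hg : b.getD j 0 = b[j] := List.getD_eq_getElem b 0 h
      by_cases hc : ak ≤ b[j] ∧ b[j] ≤ ak + t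
      · have hstep : searchStep t b j ak = j + 1 := by
          unfold searchStep; exact if_pos ⟨h, hg ▸ hc.1, hg ▸ hc.2⟩
        rw [List.foldl_cons]
        simp only [hstep, hd]
        simp only [pvG, if_pos hc]
        exact ih (j + 1) h
      · have hstep : searchStep t b j ak = j := by
          unfold searchStep; exact if_neg (by rw [hg]; tauto)
        rw [List.foldl_cons]
        simp only [hstep, hd]
        simp only [pvG, if_neg hc]
        rw [← hd]
        exact ih j hj
    · have hj' : j = b.length := le_antisymm hj h
      subst hj'
      have hstep : searchStep t b b.length ak = b.length := by
        unfold searchStep; exact if_neg (by omega)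
      rw [List.foldl_cons]
      simp only [hstep]
      rw [List.drop_length, pvG_nil_right]
      simp [foldl_step_full]

theorem outer_cons_eq (t bj : Int) (a rest : List Int)
    (IH : ∀ i : Nat, searchOuter t a rest i = pvG t (a.drop i) rest) :
    ∀ (n i : Nat), a.length - i ≤ n →
      searchOuter t a (bj :: rest) i = pvG t (a.drop i) (bj :: rest) := by
  intro n
  induction n with
  | zero =>
    intro i hi
    have hlen : a.length ≤ i := by omega
    rw [searchOuter, searchInner, dif_neg (by omega)]
    rw [List.drop_eq_nil_of_le hlen]
    rfl
  | succ n ihn =>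
    intro i hi
    rcases Nat.lt_or_ge i a.length with h | h
    · have hd : a.drop i = a[i] :: a.drop (i + 1) := List.drop_eq_getElem_cons h
      rw [searchOuter, searchInner, dif_pos h]
      by_cases hc : a[i] ≤ bj ∧ a[i] + t ≥ bj
      · rw [if_pos hc, hd]
        simp only [pvG, if_pos (show a[i] ≤ bj ∧ bj ≤ a[i] + t from ⟨hc.1, hc.2⟩)]
        exact IH (i + 1)
      · rw [if_neg hc, hd]
        simp only [pvG, if_neg (show ¬ (a[i] ≤ bj ∧ bj ≤ a[i] + t) by tauto)]
        have step : searchOuter t a (bj :: rest) (i + 1) = pvG t (a.drop (i + 1)) (bj :: rest) :=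
          ihn (i + 1) (by omega)
        rw [searchOuter] at step
        exact step
    · rw [searchOuter, searchInner, dif_neg (by omega)]
      rw [List.drop_eq_nil_of_le h]
      rfl

theorem outer_eq (t : Int) (a : List Int) :
    ∀ (b : List Int) (i : Nat), searchOuter t a b i = pvG t (a.drop i) b := by
  intro b
  induction b with
  | nil => intro i; rw [searchOuter, pvG_nil_right]
  | cons bj rest ih =>
    intro i
    exact outer_cons_eq t bj a rest ih (a.length - i) i le_rfl

-- ===== VERDICT (by name: the statement is the Claim_ definition above) =====
theorem search_eq_pvG (t : Int) (a : List Int) (b : List Int) : search t a b = pvG t a b := by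
  unfold search
  split_ifs with h
  · cases hg : pvG t a b
    · rfl
    · exact absurd (pvG_length hg) (by omega)
  · rw [outer_eq, List.drop_zero]

theorem alt_eq_pvG (t : Int) (a : List Int) (b : List Int) : search_alt t a b = pvG t a b := by
  unfold search_alt
  rw [foldl_step_eq t b a 0 (Nat.zero_le _), List.drop_zero]

theorem search_spec : Claim_equal_search := by
  intro t a b _
  show search t a b = search_alt t a b
  rw [search_eq_pvG, alt_eq_pvG]
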